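-- pv_equiv track=rewrite | github.com/strs1byn99/Foundations-and-Applications-of-Data-Mining | hw3/task1.py | hashIt
-- ===== SOURCE A (Python) =====
-- def hashIt(hashNum, bucketNum, toBeHashed, hashParams):
--     signatures = []
--     for i in range(hashNum):
--         a = hashParams[i][0]
--         b = hashParams[i][1]
--         hashedValues = []
--         for x in toBeHashed:
--             hashed = ((a * x + b) % 4380296983) % bucketNum
--             hashedValues.append(hashed)
--         signatures.append(min(hashedValues))
--     return signatures
-- ===== SOURCE B (Python) =====
-- def hashIt(hashNum, bucketNum, toBeHashed, hashParams):
--     params = [hashParams[i] for i in range(hashNum)]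
--     sigs = [None] * len(params)
--     for x in toBeHashed:
--         sigs = [h if s is None or h < s else s
--                 for s, h in zip(sigs,
--                                (((a * x + b) % 4380296983) % bucketNum
--                                 for a, b in params))]
--     return sigs
-- ===== Notes on version B (the rewrite author's own statement) =====
-- stated objective: alternative
-- what changed: B swaps the loop nesting: instead of building the full hash list per hash function and taking min(), it makes one pass over the elements maintaining a running minimum per hash function, updating all of them in parallel.
import Mathlib
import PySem

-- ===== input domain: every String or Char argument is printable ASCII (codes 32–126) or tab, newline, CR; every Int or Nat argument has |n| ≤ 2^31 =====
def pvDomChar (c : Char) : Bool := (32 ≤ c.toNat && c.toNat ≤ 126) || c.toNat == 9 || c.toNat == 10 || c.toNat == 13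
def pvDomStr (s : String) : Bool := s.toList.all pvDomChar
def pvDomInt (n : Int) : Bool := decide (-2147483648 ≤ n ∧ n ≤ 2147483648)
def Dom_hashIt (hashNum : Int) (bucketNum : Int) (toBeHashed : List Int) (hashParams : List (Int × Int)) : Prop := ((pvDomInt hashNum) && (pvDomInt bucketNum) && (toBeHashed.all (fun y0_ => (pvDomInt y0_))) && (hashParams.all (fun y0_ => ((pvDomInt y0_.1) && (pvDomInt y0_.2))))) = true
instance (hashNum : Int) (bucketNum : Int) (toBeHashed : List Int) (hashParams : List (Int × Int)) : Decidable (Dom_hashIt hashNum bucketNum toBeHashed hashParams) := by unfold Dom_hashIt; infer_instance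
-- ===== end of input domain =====

-- B swaps the loop nesting: one pass over the elements maintaining a running minimum per hash function (alternative decomposition, same cost).


-- ===== PORT A =====
-- outer loop over range(hashNum); per i build hashedValues by appending, then min()
def hashIt (hashNum : Int) (bucketNum : Int) (toBeHashed : List Int) (hashParams : List (Int × Int)) : List Int :=
  (PySem.List.pyRange 0 hashNum 1).foldl (fun signatures i =>
    let p := (PySem.List.pyGet? hashParams i).getD (0, 0)   -- Pre_ guarantees in range (none = IndexError)
    let a := p.1
    let b := p.2
    let hashedValues := toBeHashed.foldl (fun hv x =>
      hv ++ [PySem.Int.mod (PySem.Int.mod (a * x + b) 4380296983) bucketNum]) []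
    signatures ++ [(PySem.List.min? hashedValues (fun y => y)).getD 0])  -- Pre_ guarantees nonempty (none = ValueError)
    []

-- ===== PORT B =====
-- update on one running minimum: Python's 'h if s is None or h < s else s'
def hashIt_upd (s : Option Int) (h : Int) : Option Int :=
  match s with
  | none => some h
  | some v => if h < v then some h else some v

def hashIt_alt (hashNum : Int) (bucketNum : Int) (toBeHashed : List Int) (hashParams : List (Int × Int)) : List Int :=
  let params := (PySem.List.pyRange 0 hashNum 1).map (fun i => (PySem.List.pyGet? hashParams i).getD (0, 0))
  let sigs0 : List (Option Int) := List.replicate params.length none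
  let sigs := toBeHashed.foldl (fun sigs x =>
    List.zipWith (fun s p =>
      hashIt_upd s (PySem.Int.mod (PySem.Int.mod (p.1 * x + p.2) 4380296983) bucketNum)) sigs params) sigs0
  sigs.map (fun s => s.getD 0)   -- under Pre_ every entry is 'some'; Python returns the ints themselves

-- ===== PRECONDITION & SPEC =====
-- Pre_ excludes exactly the inputs where Python A raises: with a positive hashNum, an empty
-- toBeHashed (ValueError from min([])), hashParams shorter than hashNum (IndexError), or
-- bucketNum = 0 (ZeroDivisionError).
def Pre_hashIt (hashNum : Int) (bucketNum : Int) (toBeHashed : List Int) (hashParams : List (Int × Int)) : Prop :=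
  0 < hashNum → (bucketNum ≠ 0 ∧ toBeHashed ≠ [] ∧ hashNum ≤ (hashParams.length : Int))
instance (hashNum : Int) (bucketNum : Int) (toBeHashed : List Int) (hashParams : List (Int × Int)) : Decidable (Pre_hashIt hashNum bucketNum toBeHashed hashParams) := by unfold Pre_hashIt; infer_instance

def pvWitness_hashIt : Int × Int × List Int × (List (Int × Int)) := (2, 10, [3, 7, 11], [(2, 5), (4, 1)])

def Spec_hashIt (hashNum : Int) (bucketNum : Int) (toBeHashed : List Int) (hashParams : List (Int × Int)) (out : List Int) : Prop := out = hashIt_alt hashNum bucketNum toBeHashed hashParams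
instance (hashNum : Int) (bucketNum : Int) (toBeHashed : List Int) (hashParams : List (Int × Int)) (out : List Int) : Decidable (Spec_hashIt hashNum bucketNum toBeHashed hashParams out) := by unfold Spec_hashIt; infer_instance

-- ===== CLAIM (what is proved, stated in full; the proofs are below) =====
def Claim_equal_hashIt : Prop := ∀ (hashNum : Int) (bucketNum : Int) (toBeHashed : List Int) (hashParams : List (Int × Int)), Dom_hashIt hashNum bucketNum toBeHashed hashParams → Pre_hashIt hashNum bucketNum toBeHashed hashParams → Spec_hashIt hashNum bucketNum toBeHashed hashParams (hashIt hashNum bucketNum toBeHashed hashParams)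

-- ===== LEMMAS AND PROOFS =====

-- updating a running minimum already started is taking the min
theorem hashIt_upd_some (v h : Int) : hashIt_upd (some v) h = some (min v h) := by
  unfold hashIt_upd
  rcases lt_or_ge h v with hlt | hge
  · simp [hlt, le_of_lt hlt]
  · simp [not_lt.mpr hge, hge]

-- the option-minimum fold over a cons computes the running minimum
theorem hashIt_upd_foldl (f : Int → Int) (t : List Int) (a : Int) :
    t.foldl (fun s y => hashIt_upd s (f y)) (some a) = some ((t.map f).foldl min a) := by
  induction t generalizing a with
  | nil => rfl
  | cons y t ih => simp only [List.foldl_cons, List.map_cons, hashIt_upd_some, ih]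

-- one zipWith step acts pointwise on a mapped accumulator
theorem hashIt_zip_step {α β : Type} (v : β → α → β) (params : List α) (g : α → β) :
    List.zipWith (fun s p => v s p) (params.map g) params = params.map (fun p => v (g p) p) := by
  induction params with
  | nil => rfl
  | cons p ps ihp => simp [ihp]

-- the parallel zipWith fold factors into one independent fold per parameter
theorem hashIt_zip_factor {α β : Type} (u : Int → β → α → β) (l : List Int)
    (params : List α) (g : α → β) :
    l.foldl (fun sigs x => List.zipWith (fun s p => u x s p) sigs params) (params.map g)
      = params.map (fun p => l.foldl (fun s x => u x s p) (g p)) := by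
  induction l generalizing g with
  | nil => rfl
  | cons x t ih =>
      simp only [List.foldl_cons, hashIt_zip_step (u x) params g, ih (fun p => u x (g p) p)]

-- same, seeded with replicate (the [None] * len(params) initial state)
theorem hashIt_rep_factor {α β : Type} (u : Int → β → α → β) (l : List Int)
    (params : List α) (b0 : β) :
    l.foldl (fun sigs x => List.zipWith (fun s p => u x s p) sigs params)
        (List.replicate params.length b0)
      = params.map (fun p => l.foldl (fun s x => u x s p) b0) := by
  rw [show List.replicate params.length b0 = params.map (fun _ => b0) from
        (List.map_const' (l := params) (b := b0)).symm,
      hashIt_zip_factor]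

theorem hashIt_spec : Claim_equal_hashIt := by
  unfold Claim_equal_hashIt
  intro hashNum bucketNum toBeHashed hashParams _ _
  unfold Spec_hashIt hashIt hashIt_alt
  simp only [PySem.List.foldl_append_singleton_eq_map, List.nil_append, hashIt_rep_factor,
    List.map_map]
  apply List.map_congr_left
  intro i _
  set p := (PySem.List.pyGet? hashParams i).getD (0, 0) with hp
  set f : Int → Int := fun x => PySem.Int.mod (PySem.Int.mod (p.1 * x + p.2) 4380296983) bucketNum with hf
  show (PySem.List.min? (toBeHashed.map f) (fun y => y)).getD 0
      = (toBeHashed.foldl (fun s x => hashIt_upd s (f x)) none).getD 0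
  cases toBeHashed with
  | nil => rfl
  | cons x t =>
      simp only [List.map_cons, PySem.List.min?_id_cons, List.foldl_cons]
      show ((t.map f).foldl min (f x)) = ((t.foldl (fun s y => hashIt_upd s (f y)) (some (f x))).getD 0)
      rw [hashIt_upd_foldl]
      rfl

-- ===== VERDICT (by name: the statement is the Claim_ definition above) =====
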